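-- pv_equiv track=rewrite | github.com/nikolliervin/code-unc | src/code_review_cli/core/git/parser.py | _split_diff_by_files
-- ===== SOURCE A (Python) =====
-- from typing import Optional, List, Union
--
-- def _split_diff_by_files(raw_diff: str) -> List[str]:
--     """Split raw diff into sections for each file."""
--     sections = []
--     current_section = []
--
--     for line in raw_diff.split('\n'):
--         if line.startswith('diff --git'):
--             if current_section:
--                 sections.append('\n'.join(current_section))
--                 current_section = []
--         current_section.append(line)
--
--     if current_section:
--         sections.append('\n'.join(current_section))
--
--     return sections
-- ===== SOURCE B (Python) =====
-- def _split_diff_by_files(raw_diff: str):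
--     """Split raw diff into sections for each file (boundary-index slicing)."""
--     lines = raw_diff.split('\n')
--     bounds = [i for i, line in enumerate(lines) if line.startswith('diff --git')]
--     starts = bounds if bounds and bounds[0] == 0 else [0] + bounds
--     return ['\n'.join(lines[s:e]) for s, e in zip(starts, starts[1:] + [len(lines)])]
-- ===== Notes on version B (the rewrite author's own statement) =====
-- stated objective: alternative
-- what changed: Replaces the streaming accumulate-and-flush loop (building each section line-by-line in a buffer) by find-boundaries-then-slice: one pass collects the indices of 'diff --git' lines, then sections are produced by joining slices between consecutive boundary indices.
import Mathlib
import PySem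

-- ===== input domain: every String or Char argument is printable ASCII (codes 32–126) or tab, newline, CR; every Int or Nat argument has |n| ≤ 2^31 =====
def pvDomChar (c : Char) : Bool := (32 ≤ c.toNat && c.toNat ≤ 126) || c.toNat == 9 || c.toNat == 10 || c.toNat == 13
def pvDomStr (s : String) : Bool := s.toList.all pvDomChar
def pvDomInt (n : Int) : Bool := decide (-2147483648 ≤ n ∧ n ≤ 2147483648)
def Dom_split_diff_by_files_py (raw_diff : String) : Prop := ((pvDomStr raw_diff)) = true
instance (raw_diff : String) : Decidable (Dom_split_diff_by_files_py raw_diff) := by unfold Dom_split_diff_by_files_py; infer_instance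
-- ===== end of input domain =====

-- B replaces A's streaming accumulate-and-flush loop by find-boundaries-then-slice
-- (collect the indices of 'diff --git' lines, then join slices between consecutive
-- boundaries); alternative decomposition, same O(n) cost, same return value.

-- ===== PORT A =====
-- line.startswith('diff --git')
def pvMark (line : String) : Bool := PySem.Str.startswith line "diff --git"

-- the body of A's for-loop: flush the current section on a marker line, then append the line
def aStep (st : List String × List String) (line : String) : List String × List String :=
  let st := if pvMark line then
      (if st.2.isEmpty then st else (st.1 ++ [PySem.Str.join "\n" st.2], []))
    else st
  (st.1, st.2 ++ [line])

-- A's trailing 'if current_section: sections.append(...)'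
def aFin (st : List String × List String) : List String :=
  if st.2.isEmpty then st.1 else st.1 ++ [PySem.Str.join "\n" st.2]

def split_diff_by_files_py (raw_diff : String) : List String :=
  -- raw_diff.split('\n'): the separator is the nonempty literal "\n", so split? is always `some`
  let lines := (PySem.Str.split? raw_diff "\n").getD []
  aFin (lines.foldl aStep ([], []))

-- ===== PORT B =====
def split_diff_by_files_py_alt (raw_diff : String) : List String :=
  let lines := (PySem.Str.split? raw_diff "\n").getD []
  let bounds := ((PySem.List.enumerate lines).filter (fun p => pvMark p.2)).map (·.1)
  -- Python's 'bounds if bounds and bounds[0] == 0 else [0] + bounds'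
  let starts := if bounds.head? == some 0 then bounds else (0 : Int) :: bounds
  (starts.zip (PySem.List.slice starts (some 1) none ++ [(lines.length : Int)])).map
    (fun p => PySem.Str.join "\n" (PySem.List.slice lines (some p.1) (some p.2)))

-- ===== PRECONDITION & SPEC =====
def Spec_split_diff_by_files_py (raw_diff : String) (out : List String) : Prop := out = split_diff_by_files_py_alt raw_diff
instance (raw_diff : String) (out : List String) : Decidable (Spec_split_diff_by_files_py raw_diff out) := by unfold Spec_split_diff_by_files_py; infer_instance

-- ===== CLAIM (what is proved, stated in full; the proofs are below) =====
def Claim_equal_split_diff_by_files_py : Prop := ∀ (raw_diff : String), Dom_split_diff_by_files_py raw_diff → Spec_split_diff_by_files_py raw_diff (split_diff_by_files_py raw_diff)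

-- ===== LEMMAS AND PROOFS =====

-- marker indices of a line list (0-based), as both ports see them
def idxs : List String → List Nat
  | [] => []
  | l :: t => (if pvMark l then [0] else []) ++ (idxs t).map (· + 1)

-- "cut the list at the given (relative, ascending) positions and join each piece"
def cutRec : List String → List Nat → List String
  | lines, [] => [PySem.Str.join "\n" lines]
  | lines, c :: cs => PySem.Str.join "\n" (lines.take c) :: cutRec (lines.drop c) (cs.map (· - c))
termination_by _ cs => cs.length
decreasing_by simp

-- recursive reading of A's loop, for a nonempty current section `cur`
def goA : List String → List String → List String
  | cur, [] => [PySem.Str.join "\n" cur]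
  | cur, l :: ls =>
    if pvMark l then PySem.Str.join "\n" cur :: goA [l] ls else goA (cur ++ [l]) ls

theorem splitOnGo_ne_nil (sep : List Char) (fuel : Nat) : ∀ (l cur : List Char) (acc : List (List Char)),
    PySem.Chars.splitOn.go sep fuel l cur acc ≠ [] := by
  induction fuel with
  | zero => intro l cur acc; simp [PySem.Chars.splitOn.go]
  | succ n ih =>
    intro l cur acc
    match l with
    | [] => simp [PySem.Chars.splitOn.go]
    | c :: rest =>
      rw [PySem.Chars.splitOn.go]
      split
      · exact ih _ _ _
      · exact ih _ _ _

theorem lines_ne_nil (raw : String) : (PySem.Str.split? raw "\n").getD [] ≠ [] := by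
  simp [PySem.Str.split?, PySem.Chars.split?, PySem.Chars.splitOn]
  exact splitOnGo_ne_nil _ _ _ _ _

theorem aFold (ls : List String) : ∀ (secs cur : List String), cur ≠ [] →
    aFin (ls.foldl aStep (secs, cur)) = secs ++ goA cur ls := by
  induction ls with
  | nil => intro secs cur h; simp [aFin, goA, h]
  | cons l ls ih =>
    intro secs cur h
    by_cases hm : pvMark l
    · have hst : aStep (secs, cur) l = (secs ++ [PySem.Str.join "\n" cur], [l]) := by
        simp [aStep, hm, h]
      rw [List.foldl_cons, hst, ih (secs ++ [PySem.Str.join "\n" cur]) [l] (by simp)]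
      simp [goA, hm]
    · have hst : aStep (secs, cur) l = (secs, cur ++ [l]) := by simp [aStep, hm]
      rw [List.foldl_cons, hst, ih secs (cur ++ [l]) (by simp)]
      simp [goA, hm]

theorem goA_eq_cutRec (ls : List String) : ∀ (cur : List String), cur ≠ [] →
    goA cur ls = cutRec (cur ++ ls) ((idxs ls).map (· + cur.length)) := by
  induction ls with
  | nil => intro cur h; simp [goA, cutRec, idxs]
  | cons l t ih =>
    intro cur h
    by_cases hm : pvMark l
    · rw [goA, if_pos hm, ih [l] (by simp)]
      simp only [idxs, hm, if_pos, List.cons_append, List.nil_append,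
        List.map_cons, List.map_map, Nat.zero_add]
      conv_rhs => rw [cutRec]
      rw [List.take_left, List.drop_left]
      congr 2
      rw [List.map_map]
      apply List.map_congr_left
      intro x _
      simp; omega
    · rw [goA, if_neg (by simp [hm]), ih (cur ++ [l]) (by simp)]
      simp only [idxs, hm, Bool.false_eq_true, if_neg, not_false_iff, List.nil_append,
        List.map_map, List.append_assoc, List.singleton_append, List.length_append,
        List.length_singleton]
      congr 1
      apply List.map_congr_left
      intro x _
      simp; omega

theorem enum_filter_map (ls : List String) : ∀ (s : Int),
    ((PySem.List.enumerate ls s).filter (fun p => pvMark p.2)).map (·.1)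
      = (idxs ls).map (fun n : Nat => s + (n : Int)) := by
  induction ls with
  | nil => intro s; simp [PySem.List.enumerate_nil, idxs]
  | cons l t ih =>
    intro s
    rw [PySem.List.enumerate_cons]
    by_cases hm : pvMark l
    · rw [List.filter_cons_of_pos (by simpa using hm), List.map_cons, ih (s + 1)]
      simp only [idxs, hm, if_pos, List.cons_append, List.nil_append, List.map_cons,
        List.map_map]
      congr 1
      · simp
      · apply List.map_congr_left
        intro x _
        simp only [Function.comp_apply]
        push_cast
        ring
    · rw [List.filter_cons_of_neg (by simpa using hm), ih (s + 1)]
      simp only [idxs, hm, Bool.false_eq_true, if_neg, not_false_iff, List.nil_append,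
        List.map_map]
      apply List.map_congr_left
      intro x _
      simp only [Function.comp_apply]
      push_cast
      ring

theorem zip_slices (lines0 : List String) (cs : List Nat) : ∀ (s : Nat),
    ((s :: cs).Pairwise (· ≤ ·)) →
    ((((s : Nat) : Int) :: cs.map (fun n : Nat => (n : Int))).zip
        ((cs.map (fun n : Nat => (n : Int))) ++ [(lines0.length : Int)])).map
      (fun p => PySem.Str.join "\n" (PySem.List.slice lines0 (some p.1) (some p.2)))
    = cutRec (lines0.drop s) (cs.map (· - s)) := by
  induction cs with
  | nil =>
    intro s _
    simp only [List.map_nil, List.nil_append, List.zip_cons_cons, List.zip_nil_right,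
      List.map_cons, List.map_nil, cutRec]
    rw [PySem.List.slice_natCast]
    congr 2
    exact List.take_of_length_le (by simp)
  | cons c cs'' ih =>
    intro s hp
    have hsc : s ≤ c := (List.pairwise_cons.mp hp).1 c (by simp)
    have hp' : (c :: cs'').Pairwise (· ≤ ·) := (List.pairwise_cons.mp hp).2
    simp only [List.map_cons, List.cons_append, List.zip_cons_cons]
    rw [ih c hp']
    show _ :: cutRec (lines0.drop c) (cs''.map (· - c))
        = cutRec (lines0.drop s) ((c - s) :: cs''.map (· - s))
    rw [cutRec]
    congr 1
    · rw [PySem.List.slice_natCast]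
    · rw [List.drop_drop, Nat.add_sub_cancel' hsc, List.map_map]
      congr 1
      apply List.map_congr_left
      intro x _
      simp; omega

theorem idxs_pairwise (ls : List String) : (idxs ls).Pairwise (· ≤ ·) := by
  induction ls with
  | nil => simp [idxs]
  | cons l t ih =>
    have hmap : ((idxs t).map (· + 1)).Pairwise (· ≤ ·) := by
      rw [List.pairwise_map]
      exact ih.imp (by omega)
    by_cases hm : pvMark l
    · simp only [idxs, hm, if_pos, List.singleton_append, List.pairwise_cons]
      exact ⟨fun a _ => by omega, hmap⟩
    · simpa [idxs, hm] using hmap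

-- the two decompositions agree on any (nonempty) line list
theorem core_eq (l : String) (ls : List String) :
    aFin ((l :: ls).foldl aStep ([], [])) =
      (let lines := l :: ls
       let bounds := ((PySem.List.enumerate lines).filter (fun p => pvMark p.2)).map (·.1)
       let starts := if bounds.head? == some 0 then bounds else (0 : Int) :: bounds
       (starts.zip (PySem.List.slice starts (some 1) none ++ [(lines.length : Int)])).map
         (fun p => PySem.Str.join "\n" (PySem.List.slice lines (some p.1) (some p.2)))) := by
  simp only []
  set cs : List Nat := (idxs ls).map (· + 1) with hcs
  have hstep0 : aStep ([], []) l = ([], [l]) := by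
    by_cases hm : pvMark l <;> simp [aStep, hm]
  have hA : aFin ((l :: ls).foldl aStep ([], [])) = cutRec (l :: ls) cs := by
    rw [List.foldl_cons, hstep0, aFold ls [] [l] (by simp), List.nil_append,
      goA_eq_cutRec ls [l] (by simp)]
    simp [hcs]
  have hbounds : ((PySem.List.enumerate (l :: ls)).filter (fun p => pvMark p.2)).map (·.1)
      = (idxs (l :: ls)).map (fun n : Nat => (n : Int)) := by
    rw [enum_filter_map (l :: ls) 0]
    simp
  have hstarts :
      (if ((((PySem.List.enumerate (l :: ls)).filter (fun p => pvMark p.2)).map (·.1)).head? == some 0)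
        then (((PySem.List.enumerate (l :: ls)).filter (fun p => pvMark p.2)).map (·.1))
        else (0 : Int) :: (((PySem.List.enumerate (l :: ls)).filter (fun p => pvMark p.2)).map (·.1)))
      = (0 : Int) :: cs.map (fun n : Nat => (n : Int)) := by
    rw [hbounds]
    by_cases hm : pvMark l
    · rw [if_pos (by simp [idxs, hm])]
      simp [idxs, hm, hcs, List.map_map]
    · have hne : ((idxs (l :: ls)).map (fun n : Nat => (n : Int))).head? ≠ some 0 := by
        simp only [idxs, hm, Bool.false_eq_true, if_neg, not_false_iff, List.nil_append]
        cases h : (idxs ls).map (· + 1) with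
        | nil => simp
        | cons a b =>
          have ha : a ≠ 0 := by
            have : a ∈ (idxs ls).map (· + 1) := by rw [h]; simp
            simp only [List.mem_map] at this
            omega
          simp [ha]
      rw [if_neg (by simpa using hne)]
      simp [idxs, hm, hcs, List.map_map]
  have hchain : ((0 : Nat) :: cs).Pairwise (· ≤ ·) := by
    rw [List.pairwise_cons]
    refine ⟨fun a _ => by omega, ?_⟩
    rw [hcs, List.pairwise_map]
    exact (idxs_pairwise ls).imp (by omega)
  have hB := zip_slices (l :: ls) cs 0 hchain
  simp only [Nat.cast_zero] at hB
  rw [hA, hstarts, PySem.List.slice_from_one, List.tail_cons, hB]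
  simp

-- ===== VERDICT (by name: the statement is the Claim_ definition above) =====
theorem split_diff_by_files_py_spec : Claim_equal_split_diff_by_files_py := by
  intro raw _
  unfold Spec_split_diff_by_files_py split_diff_by_files_py split_diff_by_files_py_alt
  simp only []
  cases h : (PySem.Str.split? raw "\n").getD [] with
  | nil => exact absurd h (lines_ne_nil raw)
  | cons l ls => exact core_eq l ls
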